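-- pv_equiv track=rewrite | github.com/aliabuukar082-pixel/AI-powered-career-recommendations | career-ai-backend/jobs/services/data_normalizer.py | normalize_remote_type
-- ===== SOURCE A (Python) =====
-- def normalize_remote_type(job_type: str, title: str, description: str) -> str:
--     """Determine remote type from job data"""
--     # Check for remote indicators
--     remote_indicators = ['remote', 'work from home', 'wfh', 'telecommute', 'hybrid']
--
--     # Check title
--     title_lower = title.lower()
--     for indicator in remote_indicators:
--         if indicator in title_lower:
--             return 'remote' if indicator != 'hybrid' else 'hybrid'
--
--     # Check job type
--     job_type_lower = job_type.lower()
--     for indicator in remote_indicators: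
--         if indicator in job_type_lower:
--             return 'remote' if indicator != 'hybrid' else 'hybrid'
--
--     # Check description
--     desc_lower = description.lower()
--     for indicator in remote_indicators:
--         if indicator in desc_lower:
--             return 'remote' if indicator != 'hybrid' else 'hybrid'
--
--     return ''
-- ===== SOURCE B (Python) =====
-- KEYWORDS = [('remote', 0), ('work from home', 0), ('wfh', 0), ('telecommute', 0), ('hybrid', 1)]
--
--
-- def normalize_remote_type(job_type: str, title: str, description: str) -> str:
--     fields = [title.lower(), job_type.lower(), description.lower()]
--
--     def first_field(kw):
--         for i, t in enumerate(fields):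
--             if kw in t:
--                 return i
--         return 3
--
--     fi, kind = min((first_field(kw), kind) for kw, kind in KEYWORDS)
--     if fi == 3:
--         return ''
--     return 'hybrid' if kind else 'remote'
-- ===== Notes on version B (the rewrite author's own statement) =====
-- stated objective: alternative
-- what changed: Inverts the loop nesting: instead of three copy-pasted early-return scans of the indicator list per field, B computes for each keyword the index of the first field containing it and selects the answer as the lexicographic min over (field index, remote/hybrid kind) pairs.
import Mathlib
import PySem

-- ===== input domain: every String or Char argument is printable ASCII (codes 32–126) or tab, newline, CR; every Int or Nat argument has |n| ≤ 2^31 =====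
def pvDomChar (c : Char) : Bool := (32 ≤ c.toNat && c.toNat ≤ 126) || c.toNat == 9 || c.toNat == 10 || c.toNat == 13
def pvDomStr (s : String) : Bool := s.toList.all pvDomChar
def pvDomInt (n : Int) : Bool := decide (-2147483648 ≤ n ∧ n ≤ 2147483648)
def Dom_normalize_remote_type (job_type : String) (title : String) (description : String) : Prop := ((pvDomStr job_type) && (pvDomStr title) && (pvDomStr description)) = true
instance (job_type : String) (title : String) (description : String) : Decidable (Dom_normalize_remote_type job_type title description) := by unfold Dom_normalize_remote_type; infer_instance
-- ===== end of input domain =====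

-- B inverts A's loop nesting: instead of three pasted field scans with early return,
-- it finds each keyword's first matching field and takes a lexicographic min over
-- (field index, kind) pairs (objective: alternative, same cost).


-- ===== PORT A =====
-- A's 'for indicator in remote_indicators: if indicator in s: return …' loop,
-- written once and invoked for each of the three pasted copies.
def scanIndicators (inds : List String) (s : String) : Option String :=
  match inds with
  | [] => none
  | i :: rest =>
      if PySem.Str.isIn i s then
        some (if i ≠ "hybrid" then "remote" else "hybrid")
      else scanIndicators rest s

def normalize_remote_type (job_type : String) (title : String) (description : String) : String :=
  let remote_indicators := ["remote", "work from home", "wfh", "telecommute", "hybrid"]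
  let title_lower := PySem.Str.lower title
  match scanIndicators remote_indicators title_lower with
  | some r => r
  | none =>
      let job_type_lower := PySem.Str.lower job_type
      match scanIndicators remote_indicators job_type_lower with
      | some r => r
      | none =>
          let desc_lower := PySem.Str.lower description
          match scanIndicators remote_indicators desc_lower with
          | some r => r
          | none => ""

-- ===== PORT B =====
-- Source B's inner 'first_field': loop over enumerate(fields), return i on first match, else 3.
def firstFieldGo (kw : String) (pairs : List (Int × String)) : Int :=
  match pairs with
  | [] => 3
  | (i, t) :: rest => if PySem.Str.isIn kw t then i else firstFieldGo kw rest

-- Python's builtin min on 2-tuples: lexicographic, first extremal kept.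
def pyMinPair (a b : Int × Int) : Int × Int :=
  if b.1 < a.1 ∨ (b.1 = a.1 ∧ b.2 < a.2) then b else a

def normalize_remote_type_alt (job_type : String) (title : String) (description : String) : String :=
  let fields := [PySem.Str.lower title, PySem.Str.lower job_type, PySem.Str.lower description]
  let keywords : List (String × Int) :=
    [("remote", 0), ("work from home", 0), ("wfh", 0), ("telecommute", 0), ("hybrid", 1)]
  let candidates := keywords.map (fun q => (firstFieldGo q.1 (PySem.List.enumerate fields), q.2))
  match candidates with
  | [] => ""  -- unreachable: keywords is nonempty
  | c :: rest =>
      let m := rest.foldl pyMinPair c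
      if m.1 = 3 then "" else if m.2 ≠ 0 then "hybrid" else "remote"

-- ===== PRECONDITION & SPEC =====
def Spec_normalize_remote_type (job_type : String) (title : String) (description : String) (out : String) : Prop := out = normalize_remote_type_alt job_type title description
instance (job_type : String) (title : String) (description : String) (out : String) : Decidable (Spec_normalize_remote_type job_type title description out) := by unfold Spec_normalize_remote_type; infer_instance

-- ===== CLAIM (what is proved, stated in full; the proofs are below) =====
def Claim_equal_normalize_remote_type : Prop := ∀ (job_type : String) (title : String) (description : String), Dom_normalize_remote_type job_type title description → Spec_normalize_remote_type job_type title description (normalize_remote_type job_type title description)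

-- ===== LEMMAS AND PROOFS =====

-- Both ports, with the 15 substring tests abstracted into Bools, agree: checked by decide.
set_option maxHeartbeats 4000000 in
theorem core (a1 a2 a3 a4 a5 b1 b2 b3 b4 b5 c1 c2 c3 c4 c5 : Bool) :
    (match (if a1 then some "remote" else if a2 then some "remote" else if a3 then some "remote" else if a4 then some "remote" else if a5 then some "hybrid" else none : Option String) with
     | some r => r
     | none =>
       match (if b1 then some "remote" else if b2 then some "remote" else if b3 then some "remote" else if b4 then some "remote" else if b5 then some "hybrid" else none : Option String) with
       | some r => r
       | none =>
         match (if c1 then some "remote" else if c2 then some "remote" else if c3 then some "remote" else if c4 then some "remote" else if c5 then some "hybrid" else none : Option String) with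
         | some r => r
         | none => "") =
    (let f1 : Int := if a1 then 0 else if b1 then 1 else if c1 then 2 else 3
     let f2 : Int := if a2 then 0 else if b2 then 1 else if c2 then 2 else 3
     let f3 : Int := if a3 then 0 else if b3 then 1 else if c3 then 2 else 3
     let f4 : Int := if a4 then 0 else if b4 then 1 else if c4 then 2 else 3
     let f5 : Int := if a5 then 0 else if b5 then 1 else if c5 then 2 else 3
     let m := [( f2, (0:Int)), (f3, 0), (f4, 0), (f5, 1)].foldl pyMinPair (f1, 0)
     if m.1 = 3 then "" else if m.2 ≠ 0 then "hybrid" else "remote") := by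
  revert a1 a2 a3 a4 a5 b1 b2 b3 b4 b5 c1 c2 c3 c4 c5
  decide

theorem normalize_remote_type_spec' (job_type title description : String) :
    normalize_remote_type job_type title description = normalize_remote_type_alt job_type title description := by
  unfold normalize_remote_type normalize_remote_type_alt
  simp only [scanIndicators, firstFieldGo, PySem.List.enumerate_cons, PySem.List.enumerate_nil]
  exact core _ _ _ _ _ _ _ _ _ _ _ _ _ _ _

-- ===== VERDICT (by name: the statement is the Claim_ definition above) =====
theorem normalize_remote_type_spec : Claim_equal_normalize_remote_type := by
  intro job_type title description _
  exact normalize_remote_type_spec' job_type title description
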